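-- pv_equiv track=rewrite | github.com/ocornes/NTSB_accident_clustering | src/NTSBUtils.py | get_topics_lists
-- ===== SOURCE A (Python) =====
-- def get_topics_lists(cluster_word_distribution, top_clusters, n_words):
--     topics = []
--     for cluster in top_clusters:
--         sorted_dict = sorted(cluster_word_distribution[cluster].items(),
--                              key=lambda k: k[1], reverse=True)[:n_words]
--         if len(sorted_dict) > 0:
--             topics.append([k for (k, v) in sorted_dict])
--     return topics
-- ===== SOURCE B (Python) =====
-- def get_topics_lists(cluster_word_distribution, top_clusters, n_words):
--     topics = []
--     for cluster in top_clusters: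
--         items = list(cluster_word_distribution[cluster].items())
--         words = []
--         for c in sorted({v for _, v in items}, reverse=True):
--             words += [w for w, v in items if v == c]
--         words = words[:n_words]
--         if words:
--             topics.append(words)
--     return topics
-- ===== Notes on version B (the rewrite author's own statement) =====
-- stated objective: alternative
-- what changed: Per cluster, A stable-sorts the (word, count) pairs by count descending and slices; B instead groups words by count (distinct counts visited largest first, equal-count words kept in dict insertion order) and concatenates the buckets before slicing.
import Mathlib
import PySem

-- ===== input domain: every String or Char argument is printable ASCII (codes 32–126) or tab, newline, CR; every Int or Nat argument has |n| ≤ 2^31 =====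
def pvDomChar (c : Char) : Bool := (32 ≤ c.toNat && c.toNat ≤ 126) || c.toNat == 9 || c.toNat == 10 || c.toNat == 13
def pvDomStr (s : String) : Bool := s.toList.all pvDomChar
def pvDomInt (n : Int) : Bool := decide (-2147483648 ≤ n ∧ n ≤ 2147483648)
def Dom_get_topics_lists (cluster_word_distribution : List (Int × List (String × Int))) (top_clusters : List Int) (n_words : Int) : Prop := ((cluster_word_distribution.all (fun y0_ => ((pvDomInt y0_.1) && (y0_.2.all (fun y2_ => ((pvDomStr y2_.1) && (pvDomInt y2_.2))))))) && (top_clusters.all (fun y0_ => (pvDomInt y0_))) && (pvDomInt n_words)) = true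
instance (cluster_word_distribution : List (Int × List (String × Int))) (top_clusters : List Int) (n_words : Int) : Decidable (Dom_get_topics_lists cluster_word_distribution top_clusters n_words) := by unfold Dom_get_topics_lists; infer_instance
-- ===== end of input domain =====

-- B replaces A's comparison sort of each cluster's (word, count) pairs by a group-by-count traversal
-- (distinct counts visited largest first); objective: alternative algorithm, identical output
-- including tie order (equal-count words stay in dict insertion order).

-- ===== PORT A =====
def get_topics_lists (cluster_word_distribution : List (Int × List (String × Int))) (top_clusters : List Int) (n_words : Int) : List (List String) :=
  top_clusters.foldl (fun topics cluster =>
    let sorted_dict := PySem.List.slice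
      (PySem.List.sorted (((PySem.Dict.mk cluster_word_distribution).get? cluster).getD [])
        (fun k => k.2) true) none (some n_words)
    if sorted_dict.length > 0 then topics ++ [sorted_dict.map (fun kv => kv.1)] else topics) []

-- ===== PORT B =====
def get_topics_lists_alt (cluster_word_distribution : List (Int × List (String × Int))) (top_clusters : List Int) (n_words : Int) : List (List String) :=
  top_clusters.foldl (fun topics cluster =>
    let items := ((PySem.Dict.mk cluster_word_distribution).get? cluster).getD []
    let words :=
      (PySem.List.sorted (PySem.Set.ofList (items.map (fun p => p.2))) (fun c => c) true).foldl
        (fun acc c => acc ++ (items.filter (fun p => p.2 == c)).map (fun p => p.1)) []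
    let words := PySem.List.slice words none (some n_words)
    if words ≠ [] then topics ++ [words] else topics) []

-- ===== PRECONDITION & SPEC =====
-- Pre_ excludes exactly the inputs on which Python A raises KeyError: a cluster id in
-- top_clusters that is not a key of cluster_word_distribution.
def Pre_get_topics_lists (cluster_word_distribution : List (Int × List (String × Int))) (top_clusters : List Int) (n_words : Int) : Prop :=
  ∀ c ∈ top_clusters, c ∈ cluster_word_distribution.map (fun e => e.1)
instance (cluster_word_distribution : List (Int × List (String × Int))) (top_clusters : List Int) (n_words : Int) : Decidable (Pre_get_topics_lists cluster_word_distribution top_clusters n_words) := by unfold Pre_get_topics_lists; infer_instance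

def pvWitness_get_topics_lists : (List (Int × List (String × Int))) × List Int × Int :=
  ([(0, [("a", 2), ("b", 5)]), (1, [("c", 1)])], [1, 0], 2)

def Spec_get_topics_lists (cluster_word_distribution : List (Int × List (String × Int))) (top_clusters : List Int) (n_words : Int) (out : List (List String)) : Prop := out = get_topics_lists_alt cluster_word_distribution top_clusters n_words
instance (cluster_word_distribution : List (Int × List (String × Int))) (top_clusters : List Int) (n_words : Int) (out : List (List String)) : Decidable (Spec_get_topics_lists cluster_word_distribution top_clusters n_words out) := by unfold Spec_get_topics_lists; infer_instance

-- ===== CLAIM (what is proved, stated in full; the proofs are below) =====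
def Claim_equal_get_topics_lists : Prop := ∀ (cluster_word_distribution : List (Int × List (String × Int))) (top_clusters : List Int) (n_words : Int), Dom_get_topics_lists cluster_word_distribution top_clusters n_words → Pre_get_topics_lists cluster_word_distribution top_clusters n_words → Spec_get_topics_lists cluster_word_distribution top_clusters n_words (get_topics_lists cluster_word_distribution top_clusters n_words)

-- ===== LEMMAS AND PROOFS =====

-- the comparison 'insert x before the first element strictly below it' used by sorted(…, reverse=True)
def pvBef (x y : String × Int) : Bool := decide (y.2 < x.2)

-- insert k into a strictly descending list of counts (no-op if already present)
def insertDesc (k : Int) : List Int → List Int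
  | [] => [k]
  | c :: cs => if k > c then k :: c :: cs else if k = c then c :: cs else c :: insertDesc k cs

-- concatenation of the count buckets of ds, in the order of cs
def gatherC (cs : List Int) (ds : List (String × Int)) : List (String × Int) :=
  cs.flatMap (fun c => ds.filter (fun p => p.2 == c))

-- the distinct counts of l, largest first
def sortedCounts (l : List Int) : List Int :=
  PySem.List.sorted (PySem.Set.ofList l) (fun c => c) true

theorem insertBy_front (x : String × Int) (l : List (String × Int))
    (h : ∀ y ∈ l, y.2 < x.2) :
    PySem.List.insertBy pvBef x l = x :: l := by
  cases l with
  | nil => simp [PySem.List.insertBy]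
  | cons y ys => simp [PySem.List.insertBy, pvBef, h y (by simp)]

theorem insertBy_append_left (x : String × Int) (l₁ l₂ : List (String × Int))
    (h : ∀ y ∈ l₁, ¬ y.2 < x.2) :
    PySem.List.insertBy pvBef x (l₁ ++ l₂) = l₁ ++ PySem.List.insertBy pvBef x l₂ := by
  induction l₁ with
  | nil => simp
  | cons y ys ih =>
      simp only [List.cons_append, PySem.List.insertBy]
      rw [if_neg (by simpa [pvBef] using h y (by simp))]
      simpa using ih (fun z hz => h z (by simp [hz]))

theorem mem_gatherC {y : String × Int} {cs : List Int} {ds : List (String × Int)}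
    (h : y ∈ gatherC cs ds) : y.2 ∈ cs := by
  simp only [gatherC, List.mem_flatMap, List.mem_filter, beq_iff_eq] at h
  obtain ⟨c, hc, _, rfl⟩ := h
  exact hc

theorem mem_insertDesc {m k : Int} {cs : List Int} (h : m ∈ insertDesc k cs) :
    m = k ∨ m ∈ cs := by
  induction cs with
  | nil => simpa [insertDesc] using h
  | cons c cs ih =>
      simp only [insertDesc] at h
      split_ifs at h with h1 h2
      · simpa using h
      · simp [h]
      · rcases List.mem_cons.mp h with h | h
        · simp [h]
        · rcases ih h with h | h <;> simp [h]

theorem insertDesc_pairwise {k : Int} {cs : List Int} (h : cs.Pairwise (· > ·)) :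
    (insertDesc k cs).Pairwise (· > ·) := by
  induction cs with
  | nil => simp [insertDesc]
  | cons c cs ih =>
      rcases List.pairwise_cons.mp h with ⟨hc, hcs⟩
      simp only [insertDesc]
      split_ifs with h1 h2
      · refine List.pairwise_cons.mpr ⟨?_, h⟩
        intro m hm
        rcases List.mem_cons.mp hm with rfl | hm
        · exact h1
        · exact lt_trans (hc m hm) h1
      · exact h
      · refine List.pairwise_cons.mpr ⟨?_, ih hcs⟩
        intro m hm
        rcases mem_insertDesc hm with rfl | hm
        · omega
        · exact hc m hm

theorem insertDesc_of_mem {k : Int} {cs : List Int} (h : cs.Pairwise (· > ·))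
    (hk : k ∈ cs) : insertDesc k cs = cs := by
  induction cs with
  | nil => simp at hk
  | cons c cs ih =>
      rcases List.pairwise_cons.mp h with ⟨hc, hcs⟩
      rcases List.mem_cons.mp hk with rfl | hk
      · simp [insertDesc]
      · have h1 : ¬ k > c := by have := hc k hk; omega
        have hne : ¬ k = c := by have := hc k hk; omega
        simp [insertDesc, h1, hne, ih hcs hk]

theorem insertDesc_perm_of_not_mem {k : Int} {cs : List Int} (hk : k ∉ cs) :
    (insertDesc k cs).Perm (cs ++ [k]) := by
  induction cs with
  | nil => simp [insertDesc]
  | cons c cs ih =>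
      have hk' : k ∉ cs := fun h => hk (List.mem_cons_of_mem _ h)
      simp only [insertDesc]
      split_ifs with h1 h2
      · exact (List.perm_append_singleton k (c :: cs)).symm
      · exact absurd (h2 ▸ List.mem_cons_self) hk
      · simpa using (ih hk').cons c

theorem pairwise_gt_of_le_nodup {cs : List Int}
    (h1 : cs.Pairwise (fun a b => b ≤ a)) (h2 : cs.Nodup) :
    cs.Pairwise (· > ·) := by
  exact (List.Pairwise.and h1 h2).imp (fun {a b} hab => by
    rcases hab with ⟨hle, hne⟩; omega)

theorem sortedCounts_pairwise (l : List Int) : (sortedCounts l).Pairwise (· > ·) := by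
  apply pairwise_gt_of_le_nodup
  · exact PySem.List.sorted_pairwise_rev (PySem.Set.ofList l) (fun c => c)
  · exact ((PySem.List.sorted_perm (PySem.Set.ofList l) (fun c => c) true).nodup_iff).mpr
      (PySem.Set.nodup_ofList l)

theorem mem_sortedCounts {k : Int} {l : List Int} : k ∈ sortedCounts l ↔ k ∈ l := by
  rw [sortedCounts, PySem.List.mem_sorted, PySem.Set.mem_ofList]

theorem flatMap_ite_of_not_mem (x : String × Int) (cs : List Int) (ds : List (String × Int))
    (h : x.2 ∉ cs) :
    cs.flatMap (fun c => ds.filter (fun p => p.2 == c) ++ if x.2 == c then [x] else [])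
      = gatherC cs ds := by
  induction cs with
  | nil => simp [gatherC]
  | cons c cs ih =>
      have hne : ¬ (x.2 == c) = true := by
        simp only [beq_iff_eq]; intro hc; exact h (hc ▸ List.mem_cons_self)
      rw [List.flatMap_cons, if_neg hne, List.append_nil,
        ih (fun hm => h (List.mem_cons_of_mem _ hm))]
      simp [gatherC]

-- the key step: stable insertion of x into the bucket concatenation of ds
theorem insertBy_gatherC (x : String × Int) (cs : List Int) (ds : List (String × Int))
    (hpw : cs.Pairwise (· > ·))
    (hk : x.2 ∈ cs ∨ ds.filter (fun p => p.2 == x.2) = []) :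
    PySem.List.insertBy pvBef x (gatherC cs ds)
      = (insertDesc x.2 cs).flatMap
          (fun c => ds.filter (fun p => p.2 == c) ++ if x.2 == c then [x] else []) := by
  induction cs with
  | nil =>
      rcases hk with hk | hk
      · simp at hk
      · simp [gatherC, insertDesc, hk, PySem.List.insertBy]
  | cons c cs ih =>
      rcases List.pairwise_cons.mp hpw with ⟨hc, hcs⟩
      have hgat : gatherC (c :: cs) ds
          = ds.filter (fun p => p.2 == c) ++ gatherC cs ds := by
        simp [gatherC]
      have hbucket : ∀ y ∈ ds.filter (fun p => p.2 == c), y.2 = c := by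
        intro y hy
        simpa using (List.mem_filter.mp hy).2
      rcases lt_trichotomy c x.2 with hlt | heq | hgt
      · -- x.2 > c : new largest count, x goes to the very front
        have hxmem : x.2 ∉ c :: cs := by
          intro hmem
          rcases List.mem_cons.mp hmem with h | h
          · omega
          · have := hc _ h; omega
        have hfil : ds.filter (fun p => p.2 == x.2) = [] := by
          rcases hk with hk | hk
          · exact absurd hk hxmem
          · exact hk
        have hfront : ∀ y ∈ gatherC (c :: cs) ds, y.2 < x.2 := by
          intro y hy
          rcases List.mem_cons.mp (mem_gatherC hy) with h | h
          · omega
          · have := hc _ h; omega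
        rw [insertBy_front x _ hfront]
        have hid : insertDesc x.2 (c :: cs) = x.2 :: c :: cs := by
          simp [insertDesc, hlt]
        rw [hid, List.flatMap_cons, hfil, flatMap_ite_of_not_mem x _ _ hxmem]
        simp
      · -- x.2 = c : x appended at the end of c's bucket
        have hxcs : x.2 ∉ cs := by
          intro hm; have := hc _ hm; omega
        have hid : insertDesc x.2 (c :: cs) = c :: cs := by
          simp [insertDesc, ← heq]
        rw [hgat, insertBy_append_left x _ _ (by intro y hy; rw [hbucket y hy]; omega),
          insertBy_front x _ (by
            intro y hy
            have := mem_gatherC hy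
            have := hc _ this
            omega),
          hid, List.flatMap_cons, flatMap_ite_of_not_mem x _ _ hxcs]
        have : (x.2 == c) = true := by simp [heq]
        simp [this, gatherC]
      · -- x.2 < c : skip c's bucket and recurse
        have hne : ¬ (x.2 == c) = true := by simp; omega
        have hk' : x.2 ∈ cs ∨ ds.filter (fun p => p.2 == x.2) = [] := by
          rcases hk with hk | hk
          · rcases List.mem_cons.mp hk with h | h
            · omega
            · exact Or.inl h
          · exact Or.inr hk
        have hid : insertDesc x.2 (c :: cs) = c :: insertDesc x.2 cs := by
          have h1 : ¬ x.2 > c := by omega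
          have h2 : ¬ x.2 = c := by omega
          simp [insertDesc, h1, h2]
        rw [hgat, insertBy_append_left x _ _ (by intro y hy; rw [hbucket y hy]; omega),
          ih hcs hk', hid, List.flatMap_cons, if_neg hne, List.append_nil]

theorem sortedCounts_append (l : List Int) (k : Int) :
    sortedCounts (l ++ [k]) = insertDesc k (sortedCounts l) := by
  have hof : PySem.Set.ofList (l ++ [k]) = PySem.Set.add (PySem.Set.ofList l) k := by
    rw [PySem.Set.ofList_eq_foldl, PySem.Set.ofList_eq_foldl, List.foldl_append]; rfl
  by_cases hk : k ∈ PySem.Set.ofList l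
  · have : PySem.Set.add (PySem.Set.ofList l) k = PySem.Set.ofList l := by
      simp [PySem.Set.add, hk]
    rw [sortedCounts, hof, this]
    exact (insertDesc_of_mem (sortedCounts_pairwise l)
      (by rw [sortedCounts, PySem.List.mem_sorted]; exact hk)).symm
  · have hadd : PySem.Set.add (PySem.Set.ofList l) k = PySem.Set.ofList l ++ [k] := by
      simp [PySem.Set.add, hk]
    rw [sortedCounts, hof, hadd]
    apply PySem.List.sorted_rev_eq_of_perm_of_pairwise_gt
    · have hnk : k ∉ sortedCounts l := by
        rw [sortedCounts, PySem.List.mem_sorted]; exact hk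
      exact (insertDesc_perm_of_not_mem hnk).trans
        ((PySem.List.sorted_perm (PySem.Set.ofList l) (fun c => c) true).append_right [k])
    · exact insertDesc_pairwise (sortedCounts_pairwise l)

-- main characterisation: the stable descending sort is the bucket concatenation
theorem sorted_eq_gatherC (ds : List (String × Int)) :
    PySem.List.sorted ds (fun p => p.2) true
      = gatherC (sortedCounts (ds.map (fun p => p.2))) ds := by
  induction ds using List.reverseRecOn with
  | nil => rfl
  | append_singleton ds x ih =>
      rw [PySem.List.sorted_rev_eq_foldl_insertBy, List.foldl_append, List.foldl_cons,
        List.foldl_nil, ← PySem.List.sorted_rev_eq_foldl_insertBy, ih]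
      show PySem.List.insertBy pvBef x (gatherC (sortedCounts (ds.map (fun p => p.2))) ds) = _
      have hk : x.2 ∈ sortedCounts (ds.map (fun p => p.2))
          ∨ ds.filter (fun p => p.2 == x.2) = [] := by
        by_cases hm : x.2 ∈ ds.map (fun p => p.2)
        · exact Or.inl (mem_sortedCounts.mpr hm)
        · refine Or.inr (List.filter_eq_nil_iff.mpr ?_)
          intro p hp
          simp only [beq_iff_eq]
          intro hpe
          exact hm (List.mem_map.mpr ⟨p, hp, hpe⟩)
      rw [insertBy_gatherC x _ ds (sortedCounts_pairwise _) hk]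
      rw [List.map_append, List.map_cons, List.map_nil, sortedCounts_append]
      unfold gatherC
      apply List.flatMap_congr
      intro c _
      simp [List.filter_append, List.filter_cons]

-- B's per-cluster word list is A's sorted word list
theorem words_eq (items : List (String × Int)) :
    (PySem.List.sorted (PySem.Set.ofList (items.map (fun p => p.2))) (fun c => c) true).foldl
        (fun acc c => acc ++ (items.filter (fun p => p.2 == c)).map (fun p => p.1)) []
      = (PySem.List.sorted items (fun p => p.2) true).map (fun kv => kv.1) := by
  rw [PySem.List.foldl_append_eq_flatMap, List.nil_append, sorted_eq_gatherC, gatherC,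
    List.map_flatMap]
  rfl

theorem map_slice_to {α β : Type} (f : α → β) (xs : List α) (n : Int) :
    PySem.List.slice (xs.map f) none (some n) = (PySem.List.slice xs none (some n)).map f := by
  simp [PySem.List.slice, List.map_take]

-- ===== VERDICT (by name: the statement is the Claim_ definition above) =====
theorem get_topics_lists_spec : Claim_equal_get_topics_lists := by
  intro cwd top n _ _
  unfold Spec_get_topics_lists get_topics_lists get_topics_lists_alt
  apply PySem.List.foldl_congr_mem
  intro topics cluster _
  simp only []
  rw [words_eq, map_slice_to]
  have hcond : ((PySem.List.slice (PySem.List.sorted (((PySem.Dict.mk cwd).get? cluster).getD [])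
      (fun k => k.2) true) none (some n)).map (fun kv => kv.1) ≠ [])
      ↔ (PySem.List.slice (PySem.List.sorted (((PySem.Dict.mk cwd).get? cluster).getD [])
      (fun k => k.2) true) none (some n)).length > 0 := by
    simp [List.length_pos_iff]
  by_cases h : (PySem.List.slice (PySem.List.sorted (((PySem.Dict.mk cwd).get? cluster).getD [])
      (fun k => k.2) true) none (some n)).length > 0
  · rw [if_pos h, if_pos (hcond.mpr h)]
  · rw [if_neg h, if_neg (fun hne => h (hcond.mp hne))]
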